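-- pv_equiv track=rewrite | github.com/Arsen1302/Code-copy-detector | TestData/solutions/problem_1704_3.py | solution_1704_3
-- ===== SOURCE A (Python) =====
-- from typing import List
--
-- def solution_1704_3(nums: List[int], space: int) -> int:
--
--     # get a dict of modulos
--     modulo_dict = dict()
--
--     # go through the array and compute the modulo and their counter
--     for idx, num in enumerate(nums):
--         # compute the modulo
--         modi = num % space
--
--         # check whether we need to create one
--         if modi in modulo_dict:
--
--             # keep track of the smalles number
--             modulo_dict[modi][0] = min(num, modulo_dict[modi][0])
--
--             # keep track of the count of this specific modulo
--             modulo_dict[modi][1] += 1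
--         else:
--
--             # create this modulo
--             modulo_dict[modi] = [num, 1]
--
--     # go through the dict and element with the highest modulo count
--     best_ele = max(modulo_dict.values(), key=lambda x: (x[1], -x[0]))
--
--     # return the good element
--     return best_ele[0]
-- ===== SOURCE B (Python) =====
-- from typing import List
--
-- def solution_1704_3(nums: List[int], space: int) -> int:
--     # frequency table of the modulos; no per-group minimum is tracked
--     counts = {}
--     for num in nums:
--         m = num % space
--         counts[m] = counts.get(m, 0) + 1
--     # the element maximizing (count of its modulo, -value) is exactly the
--     # smallest value of the most frequent modulo class
--     return max(nums, key=lambda num: (counts[num % space], -num))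
-- ===== Notes on version B (the rewrite author's own statement) =====
-- stated objective: simpler
-- what changed: B only counts modulo frequencies (no per-group running minimum) and takes the max directly over the raw elements with key (count-of-its-modulo, -value), instead of aggregating (min, count) records per modulo and maximizing over the record list.
import Mathlib
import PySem

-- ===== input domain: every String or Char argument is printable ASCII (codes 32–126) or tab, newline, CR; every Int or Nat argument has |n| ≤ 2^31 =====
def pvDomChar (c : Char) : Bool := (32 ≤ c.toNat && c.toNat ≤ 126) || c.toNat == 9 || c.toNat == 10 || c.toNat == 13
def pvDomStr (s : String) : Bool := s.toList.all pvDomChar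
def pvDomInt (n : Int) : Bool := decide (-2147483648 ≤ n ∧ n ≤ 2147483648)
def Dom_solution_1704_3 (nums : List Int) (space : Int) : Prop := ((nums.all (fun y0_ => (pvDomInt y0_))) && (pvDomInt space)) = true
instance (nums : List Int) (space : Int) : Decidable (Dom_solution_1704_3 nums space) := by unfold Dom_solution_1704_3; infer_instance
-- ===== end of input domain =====

-- B keeps only a frequency table of the modulos and maximizes over the raw
-- elements with key (count, -value); no per-group (min, count) record is kept.

-- ===== PORT A =====
-- loop body of A: modulo_dict[modi] is a [min, count] record, updated or created
def aStep (space : Int) (d : PySem.Dict Int (Int × Int)) (num : Int) : PySem.Dict Int (Int × Int) :=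
  let modi := PySem.Int.mod num space
  if d.contains modi then
    -- modulo_dict[modi][0] = min(num, modulo_dict[modi][0]); modulo_dict[modi][1] += 1
    d.modify modi (0, 0) (fun x => (min num x.1, x.2 + 1))
  else
    d.insert modi (num, 1)

def solution_1704_3 (nums : List Int) (space : Int) : Int :=
  let modulo_dict : PySem.Dict Int (Int × Int) :=
    (PySem.List.enumerate nums 0).foldl (fun d p => aStep space d p.2) PySem.Dict.empty
  match PySem.List.max2? modulo_dict.values (fun x => x.2) (fun x => -x.1) with
  | some best => best.1
  | none => 0   -- Python raises ValueError here (nums = []); excluded by Pre_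

-- ===== PORT B =====
-- loop body of B: counts[m] = counts.get(m, 0) + 1
def bStep (space : Int) (d : PySem.Dict Int Int) (num : Int) : PySem.Dict Int Int :=
  let m := PySem.Int.mod num space
  d.insert m (d.getD m 0 + 1)

def solution_1704_3_alt (nums : List Int) (space : Int) : Int :=
  let counts : PySem.Dict Int Int := nums.foldl (bStep space) PySem.Dict.empty
  match PySem.List.max2? nums
      (fun num => counts.getD (PySem.Int.mod num space) 0) (fun num => -num) with
  | some best => best
  | none => 0   -- Python raises ValueError here (nums = []); excluded by Pre_

-- ===== PRECONDITION & SPEC =====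
-- Pre_ excludes exactly the inputs where Python A raises: nums = [] (ValueError
-- from max() over the empty dict's values) and space = 0 (ZeroDivisionError from '%').
def Pre_solution_1704_3 (nums : List Int) (space : Int) : Prop := nums ≠ [] ∧ space ≠ 0
instance (nums : List Int) (space : Int) : Decidable (Pre_solution_1704_3 nums space) := by unfold Pre_solution_1704_3; infer_instance
def pvWitness_solution_1704_3 : List Int × Int := ([1, 2, 4, 7], 3)

def Spec_solution_1704_3 (nums : List Int) (space : Int) (out : Int) : Prop := out = solution_1704_3_alt nums space
instance (nums : List Int) (space : Int) (out : Int) : Decidable (Spec_solution_1704_3 nums space out) := by unfold Spec_solution_1704_3; infer_instance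

-- ===== CLAIM (what is proved, stated in full; the proofs are below) =====
def Claim_equal_solution_1704_3 : Prop := ∀ (nums : List Int) (space : Int), Dom_solution_1704_3 nums space → Pre_solution_1704_3 nums space → Spec_solution_1704_3 nums space (solution_1704_3 nums space)

-- ===== LEMMAS AND PROOFS =====

-- Python max(xs, key=lambda x: (k1(x), k2(x))): accumulator invariant of the fold
theorem max2?_aux {α : Type} (k1 k2 : α → Int) :
    ∀ (xs : List α) (a b : α),
      List.foldl (fun acc x =>
        match acc with
        | none => some x
        | some m => if (decide (k1 m < k1 x) || !decide (k1 x < k1 m) && decide (k2 m < k2 x)) = true then some x else some m)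
        (some a) xs = some b →
      (b = a ∨ b ∈ xs) ∧ (k1 a < k1 b ∨ (k1 a = k1 b ∧ k2 a ≤ k2 b)) ∧
        ∀ y ∈ xs, k1 y < k1 b ∨ (k1 y = k1 b ∧ k2 y ≤ k2 b) := by
  intro xs
  induction xs with
  | nil =>
    intro a b h
    simp only [List.foldl_nil, Option.some.injEq] at h
    subst h
    refine ⟨Or.inl rfl, by omega, by simp⟩
  | cons x t ih =>
    intro a b h
    simp only [List.foldl_cons] at h
    by_cases hc : (decide (k1 a < k1 x) || !decide (k1 x < k1 a) && decide (k2 a < k2 x)) = true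
    · rw [if_pos hc] at h
      obtain ⟨hmem, hkey, hall⟩ := ih x b h
      simp only [Bool.or_eq_true, Bool.and_eq_true, Bool.not_eq_true', decide_eq_true_eq,
        decide_eq_false_iff_not] at hc
      refine ⟨?_, by omega, ?_⟩
      · rcases hmem with h1 | h1 <;> simp [h1]
      · intro y hy
        rcases List.mem_cons.mp hy with rfl | h1
        · exact hkey
        · exact hall y h1
    · rw [if_neg hc] at h
      obtain ⟨hmem, hkey, hall⟩ := ih a b h
      simp only [Bool.or_eq_true, Bool.and_eq_true, Bool.not_eq_true', decide_eq_true_eq,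
        decide_eq_false_iff_not, not_or, not_and] at hc
      refine ⟨?_, hkey, ?_⟩
      · rcases hmem with h1 | h1
        · exact Or.inl h1
        · right; simp [h1]
      · intro y hy
        rcases List.mem_cons.mp hy with rfl | h1
        · omega
        · exact hall y h1

-- the result of max2? is a member whose key is a lexicographic upper bound
theorem max2?_spec {α : Type} (k1 k2 : α → Int) (xs : List α) (b : α)
    (h : PySem.List.max2? xs k1 k2 = some b) :
    b ∈ xs ∧ ∀ y ∈ xs, k1 y < k1 b ∨ (k1 y = k1 b ∧ k2 y ≤ k2 b) := by
  cases xs with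
  | nil => simp [PySem.List.max2?] at h
  | cons x t =>
    simp only [PySem.List.max2?, List.foldl_cons] at h
    obtain ⟨hmem, hkey, hall⟩ := max2?_aux k1 k2 t x b h
    refine ⟨?_, ?_⟩
    · rcases hmem with h1 | h1 <;> simp [h1]
    · intro y hy
      rcases List.mem_cons.mp hy with rfl | h1
      · exact hkey
      · exact hall y h1

theorem max2?_ne_none {α : Type} (k1 k2 : α → Int) (xs : List α) (hne : xs ≠ []) :
    ∃ b, PySem.List.max2? xs k1 k2 = some b := by
  cases xs with
  | nil => exact absurd rfl hne
  | cons x t =>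
    simp only [PySem.List.max2?, List.foldl_cons]
    clear hne
    induction t generalizing x with
    | nil => exact ⟨x, rfl⟩
    | cons y t ih =>
      simp only [List.foldl_cons]
      split <;> apply ih

-- Dict.modify is definitionally an insert of the modified record
theorem get?_modify' {ν : Type} (d : PySem.Dict Int ν) (k m : Int) (d0 : ν) (g : ν → ν) :
    (d.modify k d0 g).get? m = if m = k then some (g (d.getD k d0)) else d.get? m :=
  PySem.Dict.get?_insert d k m (g (d.getD k d0))

theorem nodup_keys_modify' {ν : Type} (d : PySem.Dict Int ν) (k : Int) (d0 : ν) (g : ν → ν)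
    (h : d.keys.Nodup) : (d.modify k d0 g).keys.Nodup :=
  PySem.Dict.nodup_keys_insert d k (g (d.getD k d0)) h

-- the group of elements of l whose modulo is m
def grp (space : Int) (l : List Int) (m : Int) : List Int :=
  l.filter (fun n => PySem.Int.mod n space == m)

-- characterization of A's dict after the whole loop: each stored record is
-- (minimum of its modulo group, size of its modulo group)
theorem dictA_char (space : Int) (l : List Int) :
    (l.foldl (aStep space) PySem.Dict.empty).keys.Nodup ∧
    ∀ m : Int,
      ((l.foldl (aStep space) PySem.Dict.empty).get? m = none → grp space l m = []) ∧
      ∀ r : Int × Int, (l.foldl (aStep space) PySem.Dict.empty).get? m = some r →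
        r.1 ∈ l ∧ PySem.Int.mod r.1 space = m ∧
        (∀ y ∈ l, PySem.Int.mod y space = m → r.1 ≤ y) ∧
        r.2 = ((grp space l m).length : Int) := by
  induction l using List.reverseRecOn with
  | nil =>
    refine ⟨by simp [PySem.Dict.keys_empty], fun m => ⟨fun _ => rfl, fun r hr => ?_⟩⟩
    simp [PySem.Dict.get?_empty] at hr
  | append_singleton l x ih =>
    obtain ⟨hnd, hch⟩ := ih
    rw [List.foldl_append]
    simp only [List.foldl_cons, List.foldl_nil]
    have hgrp : ∀ m, grp space (l ++ [x]) m =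
        grp space l m ++ (if PySem.Int.mod x space == m then [x] else []) := by
      intro m
      by_cases h : PySem.Int.mod x space = m <;> simp [grp, List.filter_append, h]
    by_cases hc : (l.foldl (aStep space) PySem.Dict.empty).contains (PySem.Int.mod x space) = true
    · -- modify branch
      have hstep : aStep space (l.foldl (aStep space) PySem.Dict.empty) x =
          (l.foldl (aStep space) PySem.Dict.empty).modify (PySem.Int.mod x space) (0, 0)
            (fun v => (min x v.1, v.2 + 1)) := by
        simp [aStep, hc]
      rw [hstep]
      have hiso : (((l.foldl (aStep space) PySem.Dict.empty).get? (PySem.Int.mod x space)).isSome) = true := by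
        rw [← PySem.Dict.contains_eq_isSome_get?]; exact hc
      obtain ⟨r0, hr0⟩ := Option.isSome_iff_exists.mp hiso
      have hgetD : (l.foldl (aStep space) PySem.Dict.empty).getD (PySem.Int.mod x space) (0, 0) = r0 := by
        rw [PySem.Dict.getD_eq_get?_getD, hr0]; rfl
      obtain ⟨hr0mem, hr0mod, hr0min, hr0cnt⟩ := (hch (PySem.Int.mod x space)).2 r0 hr0
      refine ⟨nodup_keys_modify' _ _ _ _ hnd, fun m => ⟨?_, ?_⟩⟩
      · -- none case
        intro h
        rw [get?_modify'] at h
        by_cases hm : m = PySem.Int.mod x space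
        · rw [if_pos hm] at h; exact absurd h (by simp)
        · rw [if_neg hm] at h
          rw [hgrp m, (hch m).1 h]
          have : (PySem.Int.mod x space == m) = false := by
            simp [Ne.symm hm]
          rw [this]
          rfl
      · -- some case
        intro r hr
        rw [get?_modify'] at hr
        by_cases hm : m = PySem.Int.mod x space
        · subst hm
          rw [if_pos rfl, hgetD] at hr
          have hreq : r = (min x r0.1, r0.2 + 1) := by injection hr with h'; exact h'.symm
          have hcons : grp space (l ++ [x]) (PySem.Int.mod x space) =
              grp space l (PySem.Int.mod x space) ++ [x] := by
            rw [hgrp]; simp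
          refine ⟨?_, ?_, ?_, ?_⟩
          · rcases le_total x r0.1 with h' | h'
            · rw [hreq]; simp [min_eq_left h']
            · rw [hreq]; simp only [min_eq_right h']
              exact List.mem_append_left _ hr0mem
          · rcases le_total x r0.1 with h' | h'
            · rw [hreq]; simp [min_eq_left h']
            · rw [hreq]; simp only [min_eq_right h']; exact hr0mod
          · intro y hy hymod
            rcases List.mem_append.mp hy with h' | h'
            · calc r.1 ≤ r0.1 := by rw [hreq]; exact min_le_right _ _
                _ ≤ y := hr0min y h' hymod
            · have : y = x := by simpa using h'
              subst this
              rw [hreq]; exact min_le_left _ _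
          · rw [hreq, hcons]
            simp only [List.length_append, List.length_cons, List.length_nil]
            rw [hr0cnt] at *
            push_cast
            omega
        · rw [if_neg hm] at hr
          obtain ⟨h1, h2, h3, h4⟩ := (hch m).2 r hr
          refine ⟨List.mem_append_left _ h1, h2, ?_, ?_⟩
          · intro y hy hymod
            rcases List.mem_append.mp hy with h' | h'
            · exact h3 y h' hymod
            · have : y = x := by simpa using h'
              subst this
              exact absurd hymod.symm hm
          · rw [hgrp m]
            have : (PySem.Int.mod x space == m) = false := by simp [Ne.symm hm]
            rw [this]
            simpa using h4
    · -- insert branch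
      have hcf : (l.foldl (aStep space) PySem.Dict.empty).contains (PySem.Int.mod x space) = false := by
        cases h' : (l.foldl (aStep space) PySem.Dict.empty).contains (PySem.Int.mod x space)
        · rfl
        · exact absurd h' hc
      have hstep : aStep space (l.foldl (aStep space) PySem.Dict.empty) x =
          (l.foldl (aStep space) PySem.Dict.empty).insert (PySem.Int.mod x space) (x, 1) := by
        simp [aStep, hcf]
      rw [hstep]
      have hnone : (l.foldl (aStep space) PySem.Dict.empty).get? (PySem.Int.mod x space) = none :=
        (PySem.Dict.get?_eq_none_iff_contains _ _).mpr hcf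
      have hempty : grp space l (PySem.Int.mod x space) = [] := (hch _).1 hnone
      refine ⟨PySem.Dict.nodup_keys_insert _ _ _ hnd, fun m => ⟨?_, ?_⟩⟩
      · intro h
        rw [PySem.Dict.get?_insert] at h
        by_cases hm : m = PySem.Int.mod x space
        · rw [if_pos hm] at h; exact absurd h (by simp)
        · rw [if_neg hm] at h
          rw [hgrp m, (hch m).1 h]
          have : (PySem.Int.mod x space == m) = false := by simp [Ne.symm hm]
          rw [this]
          rfl
      · intro r hr
        rw [PySem.Dict.get?_insert] at hr
        by_cases hm : m = PySem.Int.mod x space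
        · subst hm
          have hreq : r = (x, 1) := by rw [if_pos rfl] at hr; injection hr with h'; exact h'.symm
          have hcons : grp space (l ++ [x]) (PySem.Int.mod x space) = [x] := by
            rw [hgrp, hempty]; simp
          refine ⟨?_, ?_, ?_, ?_⟩
          · rw [hreq]; simp
          · rw [hreq]
          · intro y hy hymod
            rcases List.mem_append.mp hy with h' | h'
            · have : y ∈ grp space l (PySem.Int.mod x space) :=
                List.mem_filter.mpr ⟨h', by simp [hymod]⟩
              rw [hempty] at this
              simp at this
            · have : y = x := by simpa using h'
              subst this
              rw [hreq]
          · rw [hreq, hcons]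
            rfl
        · rw [if_neg hm] at hr
          obtain ⟨h1, h2, h3, h4⟩ := (hch m).2 r hr
          refine ⟨List.mem_append_left _ h1, h2, ?_, ?_⟩
          · intro y hy hymod
            rcases List.mem_append.mp hy with h' | h'
            · exact h3 y h' hymod
            · have : y = x := by simpa using h'
              subst this
              exact absurd hymod.symm hm
          · rw [hgrp m]
            have : (PySem.Int.mod x space == m) = false := by simp [Ne.symm hm]
            rw [this]
            simpa using h4

-- B's counter: counts.getD m 0 is the size of the modulo group of m
theorem countsB (space : Int) (l : List Int) :
    ∀ v : Int, (l.foldl (bStep space) PySem.Dict.empty).getD v 0 = ((grp space l v).length : Int) := by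
  induction l using List.reverseRecOn with
  | nil => intro v; simp [grp, PySem.Dict.getD_empty]
  | append_singleton l x ih =>
    intro v
    rw [List.foldl_append]
    simp only [List.foldl_cons, List.foldl_nil, bStep]
    rw [PySem.Dict.getD_insert]
    have hgrp : grp space (l ++ [x]) v =
        grp space l v ++ (if PySem.Int.mod x space == v then [x] else []) := by
      by_cases h : PySem.Int.mod x space = v <;> simp [grp, List.filter_append, h]
    by_cases hv : v = PySem.Int.mod x space
    · rw [if_pos hv, hgrp, hv]
      simp only [beq_self_eq_true, if_true, List.length_append, List.length_cons, List.length_nil]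
      rw [ih]
      push_cast
      omega
    · rw [if_neg hv, hgrp]
      have : (PySem.Int.mod x space == v) = false := by simp [Ne.symm hv]
      rw [this, ih]
      simp

-- A's fold over enumerate(nums) only uses the element component
theorem enum_fold (space : Int) (nums : List Int) :
    (PySem.List.enumerate nums 0).foldl (fun d p => aStep space d p.2) PySem.Dict.empty =
      nums.foldl (aStep space) PySem.Dict.empty := by
  conv_rhs => rw [← PySem.List.map_snd_enumerate nums 0]
  rw [List.foldl_map]

-- ===== VERDICT (by name: the statement is the Claim_ definition above) =====
theorem solution_1704_3_spec : Claim_equal_solution_1704_3 := by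
  intro nums space _ hpre
  obtain ⟨hne, -⟩ := hpre
  unfold Spec_solution_1704_3
  simp only [solution_1704_3, solution_1704_3_alt, enum_fold]
  obtain ⟨hnd, hch⟩ := dictA_char space nums
  have cover : ∀ n ∈ nums, ∃ r : Int × Int,
      r ∈ (nums.foldl (aStep space) PySem.Dict.empty).values ∧
      (nums.foldl (aStep space) PySem.Dict.empty).get? (PySem.Int.mod n space) = some r := by
    intro n hn
    cases h' : (nums.foldl (aStep space) PySem.Dict.empty).get? (PySem.Int.mod n space) with
    | none =>
      have hmem : n ∈ grp space nums (PySem.Int.mod n space) :=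
        List.mem_filter.mpr ⟨hn, by simp⟩
      rw [(hch _).1 h'] at hmem
      simp at hmem
    | some r =>
      refine ⟨r, ?_, rfl⟩
      have hit := PySem.Dict.mem_items_of_get?_eq_some _ h'
      simp only [PySem.Dict.values]
      exact List.mem_map.mpr ⟨_, hit, rfl⟩
  obtain ⟨n0, hn0⟩ := List.exists_mem_of_ne_nil nums hne
  obtain ⟨r0', hr0'V, -⟩ := cover n0 hn0
  have hVne : (nums.foldl (aStep space) PySem.Dict.empty).values ≠ [] :=
    List.ne_nil_of_mem hr0'V
  obtain ⟨a, hA⟩ := max2?_ne_none (fun x : Int × Int => x.2) (fun x : Int × Int => -x.1) _ hVne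
  obtain ⟨b, hB⟩ := max2?_ne_none
    (fun num => (nums.foldl (bStep space) PySem.Dict.empty).getD (PySem.Int.mod num space) 0)
    (fun num => -num) nums hne
  rw [hA, hB]
  show a.1 = b
  obtain ⟨haV, hAmax⟩ := max2?_spec _ _ _ _ hA
  obtain ⟨hbN, hBmax⟩ := max2?_spec _ _ _ _ hB
  -- a is the record stored at some key m
  obtain ⟨p, hait, ha'⟩ := List.mem_map.mp haV
  have hgeta : (nums.foldl (aStep space) PySem.Dict.empty).get? p.1 = some a := by
    have h := PySem.Dict.get?_of_mem_items (nums.foldl (aStep space) PySem.Dict.empty)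
      (k := p.1) (v := p.2) (by simpa using hait) hnd
    rw [ha'] at h
    exact h
  obtain ⟨ha1mem, ha1mod, ha1min, ha1cnt⟩ := (hch p.1).2 a hgeta
  -- the record of b's group
  obtain ⟨rb, hrbV, hrbget⟩ := cover b hbN
  obtain ⟨hrb1mem, hrb1mod, hrb1min, hrb1cnt⟩ := (hch _).2 rb hrbget
  have hrb1b : rb.1 ≤ b := hrb1min b hbN rfl
  have h1 := hAmax rb hrbV
  have h2 := hBmax a.1 ha1mem
  simp only [countsB] at h2
  rw [ha1mod] at h2
  rw [← ha1cnt, ← hrb1cnt] at h2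
  obtain ⟨a1, a2⟩ := a
  obtain ⟨rb1, rb2⟩ := rb
  dsimp only at h1 h2 hrb1b ⊢
  rcases h1 with h1 | ⟨h1a, h1b⟩ <;> rcases h2 with h2 | ⟨h2a, h2b⟩ <;> omega
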